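-- pv_equiv track=rewrite | github.com/smeea/vdb | flask-backend/searchLibraryComponents.py | get_library_by_name
-- ===== SOURCE A (Python) =====
-- def is_match_by_initials(initials, text):
--     prev_index = 0
--
--     for c in initials:
--         index = text.find(c, prev_index)
--         if index == -1:
--                 return False
--         if index != prev_index and index != 0:
--             while text[index - 1].isalnum():
--                 index = text.find(c, index + 1)
--                 if index == -1:
--                     return False
--
--         prev_index = index + 1
--
--     return True
--
-- def get_library_by_name(pattern, library):
--     match_cards = []
--     remaining_cards = []
--     match_cards_by_initials = []
--     pattern = pattern.lower()
--     for card in library: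
--         if pattern in card['ASCII Name'].lower() or pattern in card['Name'].lower():
--             match_cards.append(card)
--         else:
--             remaining_cards.append(card)
--
--     for card in remaining_cards:
--         if is_match_by_initials(pattern, card['ASCII Name'].lower()) or is_match_by_initials(pattern, card['Name'].lower()):
--             match_cards_by_initials.append(card)
--
--     return match_cards + match_cards_by_initials
-- ===== SOURCE B (Python) =====
-- def is_match_by_initials(initials, text):
--     prev_index = 0
--
--     for c in initials:
--         index = text.find(c, prev_index)
--         if index == -1:
--                 return False
--         if index != prev_index and index != 0:
--             while text[index - 1].isalnum():
--                 index = text.find(c, index + 1)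
--                 if index == -1:
--                     return False
--
--         prev_index = index + 1
--
--     return True
--
-- def _rank(pattern, card):
--     # 0 = substring match, 1 = initials-only match, None = no match
--     if pattern in card['ASCII Name'].lower() or pattern in card['Name'].lower():
--         return 0
--     if is_match_by_initials(pattern, card['ASCII Name'].lower()) or is_match_by_initials(pattern, card['Name'].lower()):
--         return 1
--     return None
--
-- def get_library_by_name(pattern, library):
--     # decorate-sort-undecorate: classify each card once, keep (rank, card) pairs,
--     # stable-sort by rank (preserves per-group original order), strip the ranks
--     pattern = pattern.lower()
--     ranked = [(r, card) for card in library for r in (_rank(pattern, card),) if r is not None]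
--     ranked = sorted(ranked, key=lambda rc: rc[0])
--     return [card for _, card in ranked]
-- ===== Notes on version B (the rewrite author's own statement) =====
-- stated objective: alternative
-- what changed: Replaced A's partition-into-two-lists-then-rescan scheme by a decorate/stable-sort/undecorate algorithm: each card is classified once to a rank (0 = substring match, 1 = initials-only match, None = dropped), the kept (rank, card) pairs are stably sorted by rank, and the ranks are stripped; stability of the sort preserves per-group original order, which gives exactly A's substring-matches-then-initials-matches output.
import Mathlib
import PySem

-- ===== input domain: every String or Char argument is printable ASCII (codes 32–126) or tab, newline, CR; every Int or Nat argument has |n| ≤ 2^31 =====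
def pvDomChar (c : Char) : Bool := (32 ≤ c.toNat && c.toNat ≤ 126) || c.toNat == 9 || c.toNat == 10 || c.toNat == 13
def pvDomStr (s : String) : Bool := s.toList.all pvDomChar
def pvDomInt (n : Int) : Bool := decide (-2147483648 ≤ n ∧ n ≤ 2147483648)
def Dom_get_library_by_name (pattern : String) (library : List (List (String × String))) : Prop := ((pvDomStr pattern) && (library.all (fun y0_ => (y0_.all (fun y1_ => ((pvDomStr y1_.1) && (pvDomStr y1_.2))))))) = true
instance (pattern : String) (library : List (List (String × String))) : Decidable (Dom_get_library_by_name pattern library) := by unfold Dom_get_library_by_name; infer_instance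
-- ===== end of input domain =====

-- B replaces A's partition-into-two-lists-then-rescan scheme by decorate/stable-sort/
-- undecorate: each card is classified once to a rank (0 = substring match, 1 = initials-only
-- match, none = dropped), the kept (rank, card) pairs are stably sorted by rank and the
-- ranks are stripped; objective: alternative.
-- The helper is_match_by_initials is byte-for-byte identical in A and B, so both ports
-- share one definition.

-- ===== PORT A =====
-- inner 'while text[index-1].isalnum(): index = text.find(c, index+1); …' loop of
-- is_match_by_initials; fuel (text.length + 1) only makes totality evident: each
-- successful find strictly increases index, so the fuel is never exhausted.
def imbiInner (text c : List Char) : Nat → Nat → Option Nat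
  | _, 0 => none
  | index, fuel + 1 =>
    if PySem.Chars.isalnum (PySem.List.pyGetD text ((index : Int) - 1) ' ') then
      let j := PySem.Chars.findFrom text c ((index : Int) + 1) none
      if j = -1 then none else imbiInner text c j.toNat fuel
    else some index

-- literal transliteration of the helper from Source A (byte-for-byte identical in Source B);
-- the Option state is 'some prev_index' while the loop runs, 'none' once it returned False.
def is_match_by_initials (initials text : String) : Bool :=
  match initials.toList.foldl
    (fun st c =>
      match st with
      | none => none
      | some prev =>
        let index := PySem.Chars.findFrom text.toList [c] (prev : Int) none
        if index = -1 then none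
        else if index.toNat = prev ∨ index.toNat = 0 then some (index.toNat + 1)
        else
          match imbiInner text.toList [c] index.toNat (text.toList.length + 1) with
          | none => none
          | some idx => some (idx + 1)) (some 0) with
  | none => false
  | some _ => true

def get_library_by_name (pattern : String) (library : List (List (String × String))) : List (List (String × String)) :=
  let patternL := PySem.Str.lower pattern
  let pass1 := library.foldl
    (fun (acc : List (List (String × String)) × List (List (String × String))) card =>
      if PySem.Str.isIn patternL (PySem.Str.lower (((card.lookup "ASCII Name").getD ""))) ||
         PySem.Str.isIn patternL (PySem.Str.lower (((card.lookup "Name").getD ""))) then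
        (acc.1 ++ [card], acc.2)
      else
        (acc.1, acc.2 ++ [card])) ([], [])
  let match_cards_by_initials := pass1.2.foldl
    (fun acc card =>
      if is_match_by_initials patternL (PySem.Str.lower (((card.lookup "ASCII Name").getD ""))) ||
         is_match_by_initials patternL (PySem.Str.lower (((card.lookup "Name").getD ""))) then
        acc ++ [card]
      else acc) []
  pass1.1 ++ match_cards_by_initials

-- ===== PORT B =====
-- _rank from Source B: 0 = substring match, 1 = initials-only match, none = no match
def rankCard (patternL : String) (card : List (String × String)) : Option Int :=
  if PySem.Str.isIn patternL (PySem.Str.lower (((card.lookup "ASCII Name").getD ""))) ||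
     PySem.Str.isIn patternL (PySem.Str.lower (((card.lookup "Name").getD ""))) then some 0
  else if is_match_by_initials patternL (PySem.Str.lower (((card.lookup "ASCII Name").getD ""))) ||
          is_match_by_initials patternL (PySem.Str.lower (((card.lookup "Name").getD ""))) then some 1
  else none

def get_library_by_name_alt (pattern : String) (library : List (List (String × String))) : List (List (String × String)) :=
  let patternL := PySem.Str.lower pattern
  let ranked := library.flatMap (fun card =>
    match rankCard patternL card with
    | some r => [(r, card)]
    | none => [])
  (PySem.List.sorted ranked (fun rc => rc.1)).map (fun rc => rc.2)

-- ===== PRECONDITION & SPEC =====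
-- Pre_ excludes exactly the inputs on which Python A raises KeyError: a card lacking the
-- 'ASCII Name' key, or lacking the 'Name' key when the lowered pattern is not a substring of
-- the lowered ASCII name (short-circuit 'or' never looks up 'Name' otherwise).
def Pre_get_library_by_name (pattern : String) (library : List (List (String × String))) : Prop :=
  (library.all (fun card =>
    (card.lookup "ASCII Name").isSome &&
    ((card.lookup "Name").isSome ||
     PySem.Str.isIn (PySem.Str.lower pattern) (PySem.Str.lower ((card.lookup "ASCII Name").getD ""))))) = true
instance (pattern : String) (library : List (List (String × String))) : Decidable (Pre_get_library_by_name pattern library) := by unfold Pre_get_library_by_name; infer_instance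

def pvWitness_get_library_by_name : String × (List (List (String × String))) :=
  ("ab", [[("ASCII Name", "Abomb"), ("Name", "Abomb")], [("ASCII Name", "Cab"), ("Name", "Cab")]])

def Spec_get_library_by_name (pattern : String) (library : List (List (String × String))) (out : List (List (String × String))) : Prop := out = get_library_by_name_alt pattern library
instance (pattern : String) (library : List (List (String × String))) (out : List (List (String × String))) : Decidable (Spec_get_library_by_name pattern library out) := by unfold Spec_get_library_by_name; infer_instance

-- ===== CLAIM (what is proved, stated in full; the proofs are below) =====
def Claim_equal_get_library_by_name : Prop := ∀ (pattern : String) (library : List (List (String × String))), Dom_get_library_by_name pattern library → Pre_get_library_by_name pattern library → Spec_get_library_by_name pattern library (get_library_by_name pattern library)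

-- ===== LEMMAS AND PROOFS =====

-- A's first loop is a partition with two append-accumulators.
theorem foldl_partition {α : Type} (p : α → Bool) (l : List α) (a b : List α) :
    l.foldl (fun acc x => if p x then (acc.1 ++ [x], acc.2) else (acc.1, acc.2 ++ [x])) (a, b)
      = (a ++ l.filter p, b ++ l.filter (fun x => !p x)) := by
  induction l generalizing a b with
  | nil => simp
  | cons x t ih =>
    by_cases h : p x = true <;> simp [List.foldl_cons, h, ih]

-- the body of B's comprehension, with rankCard's two tests exposed as if-branches
theorem rankBody_eq (pL : String) (c : List (String × String)) :
    (match rankCard pL c with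
     | some r => [(r, c)]
     | none => ([] : List (Int × List (String × String))))
    = (if PySem.Str.isIn pL (PySem.Str.lower (((c.lookup "ASCII Name").getD ""))) ||
          PySem.Str.isIn pL (PySem.Str.lower (((c.lookup "Name").getD ""))) then [((0 : Int), c)]
       else if is_match_by_initials pL (PySem.Str.lower (((c.lookup "ASCII Name").getD ""))) ||
               is_match_by_initials pL (PySem.Str.lower (((c.lookup "Name").getD ""))) then [((1 : Int), c)]
       else []) := by
  unfold rankCard; split_ifs <;> rfl

-- the decorated list, split by rank
theorem flatMap_rank_filter0 {α : Type} (p q : α → Bool) (l : List α) :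
    (l.flatMap (fun c => if p c then [((0 : Int), c)] else if q c then [((1 : Int), c)] else [])).filter
        (fun rc => rc.1 == 0) = (l.filter p).map (fun c => ((0 : Int), c)) := by
  induction l with
  | nil => simp
  | cons x t ih =>
    by_cases hp : p x = true
    · simp [hp, ih]
    · by_cases hq : q x = true <;> simp [hp, hq, ih]

theorem flatMap_rank_filter1 {α : Type} (p q : α → Bool) (l : List α) :
    (l.flatMap (fun c => if p c then [((0 : Int), c)] else if q c then [((1 : Int), c)] else [])).filter
        (fun rc => rc.1 == 1) = ((l.filter (fun c => !p c)).filter q).map (fun c => ((1 : Int), c)) := by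
  induction l with
  | nil => simp
  | cons x t ih =>
    by_cases hp : p x = true
    · simp [hp, ih]
    · by_cases hq : q x = true <;> simp [hp, hq, ih]

-- every rank in the decorated list is 0 or 1
theorem flatMap_rank_mem {α : Type} (p q : α → Bool) (l : List α) :
    ∀ r ∈ l.flatMap (fun c => if p c then [((0 : Int), c)] else if q c then [((1 : Int), c)] else []),
      r.1 = 0 ∨ r.1 = 1 := by
  intro r hr
  rw [List.mem_flatMap] at hr
  obtain ⟨c, _, hc⟩ := hr
  split_ifs at hc <;> simp at hc <;> simp [hc]

-- insertBy skips a prefix it never inserts before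
theorem insertBy_append_of_not_before {α : Type} (before : α → α → Bool) (x : α)
    (zs os : List α) (h : ∀ z ∈ zs, before x z = false) :
    PySem.List.insertBy before x (zs ++ os) = zs ++ PySem.List.insertBy before x os := by
  induction zs with
  | nil => simp
  | cons z t ih =>
    have hz : before x z = false := h z (List.mem_cons_self)
    simp only [List.cons_append, PySem.List.insertBy, hz]
    simp [ih (fun y hy => h y (List.mem_cons_of_mem _ hy))]

-- stable insertion sort of a 0/1-keyed list keeps zeros (in order) before ones (in order)
theorem foldl_insertBy_binary {α : Type} (rs zs os : List (Int × α))
    (hrs : ∀ r ∈ rs, r.1 = 0 ∨ r.1 = 1) (hzs : ∀ z ∈ zs, z.1 = 0) (hos : ∀ o ∈ os, o.1 = 1) :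
    rs.foldl (fun acc x => PySem.List.insertBy (fun a b => decide (a.1 < b.1)) x acc) (zs ++ os)
      = (zs ++ rs.filter (fun rc => rc.1 == 0)) ++ (os ++ rs.filter (fun rc => rc.1 == 1)) := by
  induction rs generalizing zs os with
  | nil => simp
  | cons x t ih =>
    rcases hrs x List.mem_cons_self with h0 | h1
    · have hstep : PySem.List.insertBy (fun a b => decide (a.1 < b.1)) x (zs ++ os)
          = (zs ++ [x]) ++ os := by
        rw [insertBy_append_of_not_before _ _ _ _
          (fun z hz => by simp [hzs z hz, h0])]
        cases os with
        | nil => simp [PySem.List.insertBy]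
        | cons o os' =>
          have : x.1 < o.1 := by rw [h0, hos o List.mem_cons_self]; norm_num
          simp [PySem.List.insertBy, this]
      have hzs' : ∀ z ∈ zs ++ [x], z.1 = 0 := by
        intro z hz
        rcases List.mem_append.mp hz with h | h
        · exact hzs z h
        · simp at h; rw [h, h0]
      rw [List.foldl_cons, hstep,
        ih (zs ++ [x]) os (fun r hr => hrs r (List.mem_cons_of_mem _ hr)) hzs' hos]
      simp [h0]
    · have hstep : PySem.List.insertBy (fun a b => decide (a.1 < b.1)) x (zs ++ os)
          = zs ++ (os ++ [x]) := by
        rw [← List.append_assoc]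
        apply PySem.List.insertBy_of_forall_not_before
        intro y hy
        rcases List.mem_append.mp hy with h | h
        · simp [hzs y h, h1]
        · simp [hos y h, h1]
      have hos' : ∀ o ∈ os ++ [x], o.1 = 1 := by
        intro o ho
        rcases List.mem_append.mp ho with h | h
        · exact hos o h
        · simp at h; rw [h, h1]
      rw [List.foldl_cons, hstep,
        ih zs (os ++ [x]) (fun r hr => hrs r (List.mem_cons_of_mem _ hr)) hzs hos']
      simp [h1]

theorem sorted_binary {α : Type} (rs : List (Int × α)) (hrs : ∀ r ∈ rs, r.1 = 0 ∨ r.1 = 1) :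
    PySem.List.sorted rs (fun rc => rc.1)
      = rs.filter (fun rc => rc.1 == 0) ++ rs.filter (fun rc => rc.1 == 1) := by
  rw [PySem.List.sorted_eq_foldl_insertBy]
  have := foldl_insertBy_binary rs [] [] hrs (by simp) (by simp)
  simpa using this

-- ===== VERDICT (by name: the statement is the Claim_ definition above) =====
theorem get_library_by_name_spec : Claim_equal_get_library_by_name := by
  intro pattern library _ _
  unfold Spec_get_library_by_name get_library_by_name get_library_by_name_alt
  simp only [rankBody_eq]
  rw [sorted_binary _ (flatMap_rank_mem
    (fun c => PySem.Str.isIn (PySem.Str.lower pattern) (PySem.Str.lower (((c.lookup "ASCII Name").getD ""))) ||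
              PySem.Str.isIn (PySem.Str.lower pattern) (PySem.Str.lower (((c.lookup "Name").getD ""))))
    (fun c => is_match_by_initials (PySem.Str.lower pattern) (PySem.Str.lower (((c.lookup "ASCII Name").getD ""))) ||
              is_match_by_initials (PySem.Str.lower pattern) (PySem.Str.lower (((c.lookup "Name").getD ""))))
    library), flatMap_rank_filter0, flatMap_rank_filter1]
  simp only [foldl_partition, PySem.List.foldl_append_if_eq_filter, List.nil_append,
    List.map_append, List.map_map]
  simp
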